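-- pv_equiv track=rewrite | github.com/mpajunen/advent-of-code | 2017/day11.py | solve
-- ===== SOURCE A (Python) =====
-- def distance(vec):
--     q, r = vec
--     dq, dr = abs(q), abs(r)
--
--     # Find sectors where a single step can bring us
--     # towards the target on both q and r axes.
--     if q > 0 > r or r > 0 > q:
--         return max(dq, dr)
--     else:
--         return dq + dr
--
-- def solve(incoming):
--     dist_q, dist_r = 0, 0
--     dist = 0
--     max_dist = 0
--
--     for (q, r) in incoming:
--         dist_q += q
--         dist_r += r
--
--         total = dist_q, dist_r
--         dist = distance(total)
--         max_dist = max(dist, max_dist)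
--
--     return dist, max_dist
-- ===== SOURCE B (Python) =====
-- def solve(incoming):
--     tq = sum(q for q, _ in incoming)
--     tr = sum(r for _, r in incoming)
--     final = (abs(tq) + abs(tr) + abs(tq + tr)) // 2
--     best = 0
--     q, r = tq, tr
--     for dq, dr in reversed(incoming):
--         best = max(best, (abs(q) + abs(r) + abs(q + r)) // 2)
--         q -= dq
--         r -= dr
--     return final, best
-- ===== Notes on version B (the rewrite author's own statement) =====
-- stated objective: alternative
-- what changed: B computes the final answer directly from the coordinate totals with the branch-free closed-form hex distance (|q|+|r|+|q+r|)//2, then finds the running maximum by walking the moves BACKWARD from the total, subtracting each move, instead of A's forward fused scan with a branchy sector-based distance.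
import Mathlib
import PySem

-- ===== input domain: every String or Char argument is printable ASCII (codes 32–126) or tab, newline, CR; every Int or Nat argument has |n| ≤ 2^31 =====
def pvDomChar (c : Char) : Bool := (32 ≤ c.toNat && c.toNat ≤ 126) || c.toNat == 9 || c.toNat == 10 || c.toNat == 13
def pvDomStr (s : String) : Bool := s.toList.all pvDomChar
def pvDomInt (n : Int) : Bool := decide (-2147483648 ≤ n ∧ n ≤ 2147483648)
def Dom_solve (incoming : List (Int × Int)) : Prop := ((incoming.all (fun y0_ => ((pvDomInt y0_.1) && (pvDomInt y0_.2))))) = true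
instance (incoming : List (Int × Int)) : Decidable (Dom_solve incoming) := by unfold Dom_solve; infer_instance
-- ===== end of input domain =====

-- B replaces A's forward fused scan (branchy sector distance + running max) by totals-first
-- computation with the closed-form distance (|q|+|r|+|q+r|)//2 and a backward subtraction scan
-- for the maximum; same O(n) cost ("alternative").


-- ===== PORT A =====
def distanceA (vec : Int × Int) : Int :=
  let q := vec.1; let r := vec.2
  let dq := q.natAbs; let dr := r.natAbs
  if (q > 0 ∧ 0 > r) ∨ (r > 0 ∧ 0 > q) then max (dq : Int) (dr : Int)
  else (dq : Int) + (dr : Int)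

-- A's loop body; state: ((dist_q, dist_r), dist, max_dist)
def stepA (st : (Int × Int) × Int × Int) (p : Int × Int) : (Int × Int) × Int × Int :=
  let dq := st.1.1 + p.1
  let dr := st.1.2 + p.2
  let d := distanceA (dq, dr)
  ((dq, dr), d, max d st.2.2)

def solve (incoming : List (Int × Int)) : Int × Int :=
  (incoming.foldl stepA ((0, 0), 0, 0)).2

-- ===== PORT B =====
-- closed-form hex distance (abs(q) + abs(r) + abs(q + r)) // 2
def distB (q r : Int) : Int :=
  PySem.Int.floordiv ((q.natAbs : Int) + (r.natAbs : Int) + ((q + r).natAbs : Int)) 2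

-- B's backward loop body; state: (best, q, r)
def stepB (st : Int × Int × Int) (m : Int × Int) : Int × Int × Int :=
  (max st.1 (distB st.2.1 st.2.2), st.2.1 - m.1, st.2.2 - m.2)

def solve_alt (incoming : List (Int × Int)) : Int × Int :=
  let tq := (incoming.map Prod.fst).sum
  let tr := (incoming.map Prod.snd).sum
  let final := distB tq tr
  let res := incoming.reverse.foldl stepB (0, tq, tr)
  (final, res.1)

-- ===== PRECONDITION & SPEC =====
def Spec_solve (incoming : List (Int × Int)) (out : Int × Int) : Prop := out = solve_alt incoming
instance (incoming : List (Int × Int)) (out : Int × Int) : Decidable (Spec_solve incoming out) := by unfold Spec_solve; infer_instance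

-- ===== CLAIM (what is proved, stated in full; the proofs are below) =====
def Claim_equal_solve : Prop := ∀ (incoming : List (Int × Int)), Dom_solve incoming → Spec_solve incoming (solve incoming)

-- ===== LEMMAS AND PROOFS =====
-- running max over the distances of the nonempty prefix positions starting at p
def prefMax (p : Int × Int) (l : List (Int × Int)) (m : Int) : Int :=
  match l with
  | [] => m
  | x :: xs => prefMax (p.1 + x.1, p.2 + x.2) xs (max m (distB (p.1 + x.1) (p.2 + x.2)))

theorem dist_eq (q r : Int) : distB q r = distanceA (q, r) := by
  simp only [distB, distanceA]
  rw [PySem.Int.floordiv_eq_ediv_of_pos (by omega)]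
  split_ifs with h
  · rw [max_def]; split_ifs <;> omega
  · omega

theorem prefMax_max (l : List (Int × Int)) : ∀ p m c,
    prefMax p l (max m c) = max (prefMax p l m) c := by
  induction l with
  | nil => intro p m c; simp [prefMax]
  | cons x xs ih =>
    intro p m c
    simp only [prefMax]
    rw [max_right_comm, ih]

theorem foldA (l : List (Int × Int)) : ∀ p d m,
    l.foldl stepA (p, d, m) =
      ((p.1 + (l.map Prod.fst).sum, p.2 + (l.map Prod.snd).sum),
       (if l = [] then d
        else distB (p.1 + (l.map Prod.fst).sum) (p.2 + (l.map Prod.snd).sum)),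
       prefMax p l m) := by
  induction l with
  | nil => intro p d m; simp [prefMax]
  | cons x xs ih =>
    intro p d m
    rw [List.foldl_cons]
    show List.foldl stepA ((p.1 + x.1, p.2 + x.2), distanceA (p.1 + x.1, p.2 + x.2),
        max (distanceA (p.1 + x.1, p.2 + x.2)) m) xs = _
    rw [ih]
    rcases eq_or_ne xs [] with h | h
    · subst h; simp [prefMax, ← dist_eq, max_comm]
    · simp [prefMax, ← dist_eq, max_comm, h, add_assoc]

theorem foldB (l : List (Int × Int)) : ∀ m q r,
    l.reverse.foldl stepB (m, q + (l.map Prod.fst).sum, r + (l.map Prod.snd).sum) =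
      (prefMax (q, r) l m, q, r) := by
  induction l with
  | nil => intro m q r; simp [prefMax]
  | cons x xs ih =>
    intro m q r
    rw [List.reverse_cons, List.foldl_append]
    have h1 : q + ((x :: xs).map Prod.fst).sum = (q + x.1) + (xs.map Prod.fst).sum := by
      simp; ring
    have h2 : r + ((x :: xs).map Prod.snd).sum = (r + x.2) + (xs.map Prod.snd).sum := by
      simp; ring
    rw [h1, h2, ih]
    show (max (prefMax (q + x.1, r + x.2) xs m) (distB (q + x.1) (r + x.2)),
          q + x.1 - x.1, r + x.2 - x.2) = _
    rw [← prefMax_max]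
    simp [prefMax]

-- ===== VERDICT (by name: the statement is the Claim_ definition above) =====
theorem solve_spec : Claim_equal_solve := by
  intro incoming _
  show (incoming.foldl stepA ((0, 0), 0, 0)).2 = solve_alt incoming
  rw [foldA]
  simp only [solve_alt]
  have hB := foldB incoming 0 0 0
  simp only [zero_add] at hB
  rw [hB]
  cases incoming with
  | nil => simp [distB, PySem.Int.floordiv]
  | cons x xs => simp
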